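-- pv_equiv track=rewrite | github.com/shubhlodhi/DSA-Basic-GFG- | list/advanced list/prct.py | stb
-- ===== SOURCE A (Python) =====
-- def stb(a,n,l,h):
--    # l =0
--    if l>=h:
--       return 0
--    # h =n-1
--    res =0
--
--    for i in range(l,h):
--       for j in range(i+1,n):
--          if a[j]>a[i]:
--             curr = a[j]-a[i] + stb(a,n,l,i-1)+ stb(a,n,j+1,h)
--             res = max(res , curr)
--    return res
--
-- a = [34,8,10,3,2,80,30,33,1]
--
-- n =len(a)
-- ===== SOURCE B (Python) =====
-- def stb(a, n, l, h):
--     # Bottom-up interval DP: an index i with i+1 >= n has an empty j-loop, so the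
--     # effective upper bound is H = min(h, n-1); compute every subproblem value
--     # F[(x, y)] for l <= x, y <= H in order of increasing interval width.
--     H = min(h, n - 1)
--     if l >= H:
--         return 0
--     F = {}
--
--     def get(x, y):
--         if x >= y:
--             return 0
--         return F.get((x, y), 0)
--
--     for d in range(1, H - l + 1):
--         for x in range(l, H - d + 1):
--             y = x + d
--             best = 0
--             for i in range(x, y):
--                 for j in range(i + 1, n):
--                     if a[j] > a[i]:
--                         best = max(best, a[j] - a[i] + get(x, i - 1) + get(j + 1, y))
--             F[(x, y)] = best
--     return get(l, H)
-- ===== Notes on version B (the rewrite author's own statement) =====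
-- stated objective: alternative
-- what changed: Replaces A's naive recursion over (l,h) interval subproblems (exponentially many repeated calls) by a bottom-up dynamic-programming dict filled in order of increasing interval width, then read off at (l,h).
import Mathlib
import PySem

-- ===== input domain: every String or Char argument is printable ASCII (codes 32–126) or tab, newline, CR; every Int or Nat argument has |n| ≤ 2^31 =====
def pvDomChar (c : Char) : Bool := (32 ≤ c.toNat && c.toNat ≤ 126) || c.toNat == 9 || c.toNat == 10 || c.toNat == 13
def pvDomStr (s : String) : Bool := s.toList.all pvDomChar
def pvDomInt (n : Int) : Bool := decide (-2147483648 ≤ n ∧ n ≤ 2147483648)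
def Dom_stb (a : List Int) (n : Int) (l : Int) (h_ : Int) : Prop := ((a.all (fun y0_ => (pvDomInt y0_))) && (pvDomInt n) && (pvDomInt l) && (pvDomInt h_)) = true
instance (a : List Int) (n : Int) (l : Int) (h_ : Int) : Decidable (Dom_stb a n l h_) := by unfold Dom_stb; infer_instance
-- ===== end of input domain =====

-- B replaces A's naive recursion over (l,h) interval subproblems (exponentially many repeated
-- calls) by a bottom-up dynamic-programming table filled in order of increasing interval width.

-- ===== PORT A =====
-- A's recursion, with fuel (h_-l).toNat making the same computation total;
-- every recursive call strictly shrinks the interval, so the fuel never runs out on real calls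
-- (stbF_eq_stb below). Under the task's types a[i]/a[j] are PySem.List.pyGetD reads.
def stbF : Nat → List Int → Int → Int → Int → Int
  | 0, _, _, _, _ => 0
  | fuel + 1, a, n, l, h_ =>
    if l ≥ h_ then 0
    else
      (PySem.List.pyRange l h_ 1).foldl (fun res i =>
        (PySem.List.pyRange (i + 1) n 1).foldl (fun res j =>
          if PySem.List.pyGetD a j 0 > PySem.List.pyGetD a i 0 then
            max res (PySem.List.pyGetD a j 0 - PySem.List.pyGetD a i 0 +
                     stbF fuel a n l (i - 1) + stbF fuel a n (j + 1) h_)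
          else res) res) 0

def stb (a : List Int) (n : Int) (l : Int) (h_ : Int) : Int :=
  stbF (h_ - l).toNat a n l h_

-- ===== PORT B =====
-- guarded table read (Source B's `get`)
def pvGet (F : PySem.Dict (Int × Int) Int) (x : Int) (y : Int) : Int :=
  if x ≥ y then 0 else F.getD (x, y) 0

-- one cell's value (Source B's inner `best` loops)
def pvCell (a : List Int) (n : Int) (F : PySem.Dict (Int × Int) Int) (x : Int) (y : Int) : Int :=
  (PySem.List.pyRange x y 1).foldl (fun best i =>
    (PySem.List.pyRange (i + 1) n 1).foldl (fun best j =>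
      if PySem.List.pyGetD a j 0 > PySem.List.pyGetD a i 0 then
        max best (PySem.List.pyGetD a j 0 - PySem.List.pyGetD a i 0 +
                  pvGet F x (i - 1) + pvGet F (j + 1) y)
      else best) best) 0

-- the two filling loops of Source B over widths 1 .. h_-l (the dict F is threaded through the folds)
def pvFill (a : List Int) (n : Int) (l : Int) (h_ : Int) : PySem.Dict (Int × Int) Int :=
  (PySem.List.pyRange 1 (h_ - l + 1) 1).foldl
    (fun F d =>
      (PySem.List.pyRange l (h_ - d + 1) 1).foldl
        (fun F x => F.insert (x, x + d) (pvCell a n F x (x + d))) F)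
    PySem.Dict.empty

def stb_alt (a : List Int) (n : Int) (l : Int) (h_ : Int) : Int :=
  if l ≥ min h_ (n - 1) then 0
  else pvGet (pvFill a n l (min h_ (n - 1))) l (min h_ (n - 1))

-- ===== PRECONDITION & SPEC =====
-- Exactly the inputs on which Python A returns: either no a[i]/a[j] access happens (trivial
-- interval, or every inner range(i+1, n) is empty), or every accessed index is in range
-- (Python negative indices included). Outside Pre_ A raises IndexError.
def Pre_stb (a : List Int) (n : Int) (l : Int) (h_ : Int) : Prop :=
  l ≥ h_ ∨ min (h_ - 1) (n - 2) < l ∨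
    (-(a.length : Int) ≤ l ∧ min (h_ - 1) (n - 2) < (a.length : Int) ∧ n ≤ (a.length : Int))
instance (a : List Int) (n : Int) (l : Int) (h_ : Int) : Decidable (Pre_stb a n l h_) := by
  unfold Pre_stb; infer_instance

def pvWitness_stb : List Int × Int × Int × Int := ([3, 1, 5, 2], 4, 0, 3)

def Spec_stb (a : List Int) (n : Int) (l : Int) (h_ : Int) (out : Int) : Prop := out = stb_alt a n l h_
instance (a : List Int) (n : Int) (l : Int) (h_ : Int) (out : Int) : Decidable (Spec_stb a n l h_ out) := by unfold Spec_stb; infer_instance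

-- ===== CLAIM (what is proved, stated in full; the proofs are below) =====
def Claim_equal_stb : Prop := ∀ (a : List Int) (n : Int) (l : Int) (h_ : Int), Dom_stb a n l h_ → Pre_stb a n l h_ → Spec_stb a n l h_ (stb a n l h_)

-- ===== LEMMAS AND PROOFS =====

-- trivial interval: any fuel returns 0
theorem stbF_of_ge (fuel : Nat) (a : List Int) (n l h_ : Int) (h : l ≥ h_) :
    stbF fuel a n l h_ = 0 := by
  cases fuel with
  | zero => rfl
  | succ f => simp only [stbF]; rw [if_pos h]

-- fuel irrelevance: any sufficient fuel computes stb's value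
theorem stbF_eq_stb (fuel : Nat) (a : List Int) (n l h_ : Int)
    (hf : (h_ - l).toNat ≤ fuel) : stbF fuel a n l h_ = stb a n l h_ := by
  induction fuel using Nat.strong_induction_on generalizing l h_ with
  | _ fuel ih =>
    by_cases hlh : l < h_
    · obtain ⟨f, rfl⟩ : ∃ f, fuel = f + 1 := ⟨fuel - 1, by omega⟩
      obtain ⟨m, hm⟩ : ∃ m, (h_ - l).toNat = m + 1 := ⟨(h_ - l).toNat - 1, by omega⟩
      show stbF (f + 1) a n l h_ = stbF (h_ - l).toNat a n l h_
      rw [hm]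
      simp only [stbF]
      rw [if_neg (by omega), if_neg (by omega)]
      refine PySem.List.foldl_congr_mem _ _ _ _ ?_
      intro acc i hi
      rw [PySem.List.mem_pyRange_one] at hi
      refine PySem.List.foldl_congr_mem _ _ _ _ ?_
      intro acc2 j hj
      rw [PySem.List.mem_pyRange_one] at hj
      rw [ih f (by omega) l (i - 1) (by omega), ih f (by omega) (j + 1) h_ (by omega),
          ih m (by omega) l (i - 1) (by omega), ih m (by omega) (j + 1) h_ (by omega)]
    · rw [stbF_of_ge _ _ _ _ _ (by omega)]
      unfold stb
      rw [stbF_of_ge _ _ _ _ _ (by omega)]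

-- one unfolding of A's recursion, recursive calls written with stb itself
theorem stb_unfold (a : List Int) (n l h_ : Int) (h : l < h_) :
    stb a n l h_ =
      (PySem.List.pyRange l h_ 1).foldl (fun res i =>
        (PySem.List.pyRange (i + 1) n 1).foldl (fun res j =>
          if PySem.List.pyGetD a j 0 > PySem.List.pyGetD a i 0 then
            max res (PySem.List.pyGetD a j 0 - PySem.List.pyGetD a i 0 +
                     stb a n l (i - 1) + stb a n (j + 1) h_)
          else res) res) 0 := by
  obtain ⟨m, hm⟩ : ∃ m, (h_ - l).toNat = m + 1 := ⟨(h_ - l).toNat - 1, by omega⟩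
  show stbF (h_ - l).toNat a n l h_ = _
  rw [hm]
  simp only [stbF]
  rw [if_neg (by omega)]
  refine PySem.List.foldl_congr_mem _ _ _ _ ?_
  intro acc i hi
  rw [PySem.List.mem_pyRange_one] at hi
  refine PySem.List.foldl_congr_mem _ _ _ _ ?_
  intro acc2 j hj
  rw [PySem.List.mem_pyRange_one] at hj
  rw [stbF_eq_stb m a n l (i - 1) (by omega), stbF_eq_stb m a n (j + 1) h_ (by omega)]

-- table invariant: every (guarded) read of a cell of width < d is A's value
def pvInv (a : List Int) (n l h_ d : Int) (F : PySem.Dict (Int × Int) Int) : Prop :=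
  ∀ x y : Int, l ≤ x → y ≤ h_ → y - x < d → pvGet F x y = stb a n x y

-- a fold of inserts leaves untouched keys alone
theorem foldl_ins_read (a : List Int) (n d : Int) (xs : List Int)
    (F : PySem.Dict (Int × Int) Int) (x0 y0 : Int)
    (h : ∀ x ∈ xs, ¬(x0 = x ∧ y0 = x + d)) :
    ((xs.foldl (fun F x => F.insert (x, x + d) (pvCell a n F x (x + d))) F).getD (x0, y0) 0) =
      F.getD (x0, y0) 0 := by
  induction xs generalizing F with
  | nil => rfl
  | cons x xs ih =>
    rw [List.foldl_cons, ih _ (fun x' hx' => h x' (List.mem_cons_of_mem _ hx'))]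
    rw [PySem.Dict.getD_insert]
    rw [if_neg (by
      intro hc
      exact h x (List.mem_cons_self) ⟨congrArg Prod.fst hc, congrArg Prod.snd hc⟩)]

-- inserting a width-d cell preserves the width-< d invariant
theorem pvInv_ins (a : List Int) (n l h_ d : Int) (F : PySem.Dict (Int × Int) Int) (x : Int)
    (hF : pvInv a n l h_ d F) :
    pvInv a n l h_ d (F.insert (x, x + d) (pvCell a n F x (x + d))) := by
  intro x0 y0 hx0 hy0 hg
  unfold pvGet
  split_ifs with hc
  · have := hF x0 y0 hx0 hy0 hg
    unfold pvGet at this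
    rw [if_pos hc] at this
    exact this
  · rw [PySem.Dict.getD_insert, if_neg (by
      intro hk
      have h1 : x0 = x := congrArg Prod.fst hk
      have h2 : y0 = x + d := congrArg Prod.snd hk
      omega)]
    have := hF x0 y0 hx0 hy0 hg
    unfold pvGet at this
    rw [if_neg hc] at this
    exact this

-- the inner loop body computes A's value for its cell when all narrower cells are correct
theorem pvCell_correct (a : List Int) (n l h_ d : Int) (F : PySem.Dict (Int × Int) Int)
    (x y : Int) (hx : l ≤ x) (hy : y ≤ h_) (hxy : x < y) (hd : y - x ≤ d)
    (hF : pvInv a n l h_ d F) :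
    pvCell a n F x y = stb a n x y := by
  rw [stb_unfold a n x y hxy]
  unfold pvCell
  refine PySem.List.foldl_congr_mem _ _ _ _ ?_
  intro acc i hi
  rw [PySem.List.mem_pyRange_one] at hi
  refine PySem.List.foldl_congr_mem _ _ _ _ ?_
  intro acc2 j hj
  rw [PySem.List.mem_pyRange_one] at hj
  rw [hF x (i - 1) hx (by omega) (by omega), hF (j + 1) y (by omega) hy (by omega)]

-- filling one diagonal: the invariant is kept and every written cell holds A's value
theorem pvDiag (a : List Int) (n l h_ d : Int) (hd : 1 ≤ d) (xs : List Int)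
    (hxs : ∀ x ∈ xs, l ≤ x ∧ x + d ≤ h_) (hnd : xs.Nodup)
    (F : PySem.Dict (Int × Int) Int) (hF : pvInv a n l h_ d F) :
    pvInv a n l h_ d (xs.foldl (fun F x => F.insert (x, x + d) (pvCell a n F x (x + d))) F) ∧
      ∀ x ∈ xs,
        pvGet (xs.foldl (fun F x => F.insert (x, x + d) (pvCell a n F x (x + d))) F) x (x + d) =
          stb a n x (x + d) := by
  induction xs generalizing F with
  | nil => exact ⟨hF, by simp⟩
  | cons x xs ih =>
    have hxd := hxs x (List.mem_cons_self)
    have hnotmem : x ∉ xs := (List.nodup_cons.mp hnd).1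
    have hF' := pvInv_ins a n l h_ d F x hF
    obtain ⟨ihInv, ihCells⟩ := ih (fun x' hx' => hxs x' (List.mem_cons_of_mem _ hx'))
      (List.nodup_cons.mp hnd).2 _ hF'
    rw [List.foldl_cons]
    refine ⟨ihInv, ?_⟩
    intro x' hx'
    rcases List.mem_cons.mp hx' with heq | hx'
    · subst heq
      unfold pvGet
      rw [if_neg (by omega)]
      rw [foldl_ins_read a n d xs _ x' (x' + d)
            (by intro z hz hc; exact hnotmem (hc.1 ▸ hz))]
      rw [PySem.Dict.getD_insert_self]
      exact pvCell_correct a n l h_ d F x' (x' + d) hxd.1 hxd.2 (by omega) (by omega) hF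
    · exact ihCells x' hx'

-- one pass of the outer loop raises the invariant's width bound by one
theorem pvDiag_full (a : List Int) (n l h_ d : Int) (hd : 1 ≤ d)
    (F : PySem.Dict (Int × Int) Int) (hF : pvInv a n l h_ d F) :
    pvInv a n l h_ (d + 1)
      ((PySem.List.pyRange l (h_ - d + 1) 1).foldl
        (fun F x => F.insert (x, x + d) (pvCell a n F x (x + d))) F) := by
  obtain ⟨hInv, hCells⟩ := pvDiag a n l h_ d hd (PySem.List.pyRange l (h_ - d + 1) 1)
    (fun x hx => by rw [PySem.List.mem_pyRange_one] at hx; omega)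
    (PySem.List.nodup_pyRange_one l (h_ - d + 1)) F hF
  intro x y hx hy hg
  by_cases hlt : y - x < d
  · exact hInv x y hx hy hlt
  · have hyx : y = x + d := by omega
    subst hyx
    exact hCells x (by rw [PySem.List.mem_pyRange_one]; omega)

-- the outer loop from width d0 through d0 + k - 1
theorem pvFrom (a : List Int) (n l h_ : Int) (k : Nat) :
    ∀ (d0 : Int) (F : PySem.Dict (Int × Int) Int), 1 ≤ d0 → pvInv a n l h_ d0 F →
      pvInv a n l h_ (d0 + k)
        ((PySem.List.pyRange d0 (d0 + k) 1).foldl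
          (fun F d =>
            (PySem.List.pyRange l (h_ - d + 1) 1).foldl
              (fun F x => F.insert (x, x + d) (pvCell a n F x (x + d))) F) F) := by
  induction k with
  | zero =>
    intro d0 F hd0 hF
    rw [PySem.List.pyRange_one_eq_nil (by omega)]
    simpa using hF
  | succ k ih =>
    intro d0 F hd0 hF
    have hsplit : PySem.List.pyRange d0 (d0 + ((k : Nat) + 1 : Nat)) 1 =
        PySem.List.pyRange d0 (d0 + (k : Nat)) 1 ++ [d0 + (k : Nat)] := by
      rw [show (d0 + (((k : Nat) + 1 : Nat) : Nat) : Int) = d0 + (k : Nat) + 1 by push_cast; ring]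
      exact PySem.List.pyRange_one_succ_right (by omega)
    rw [hsplit, List.foldl_append, List.foldl_cons, List.foldl_nil]
    have hmid := ih d0 F hd0 hF
    have := pvDiag_full a n l h_ (d0 + k) (by omega) _ hmid
    rw [show (d0 + ((k : Nat) + 1 : Nat) : Int) = d0 + (k : Nat) + 1 by push_cast; ring]
    exact this

-- rows i with i + 1 ≥ n have an empty inner range, so A's value is 0 past n - 1 …
theorem stb_of_ge_pred (a : List Int) (n x y : Int) (hx : n - 1 ≤ x) :
    stb a n x y = 0 := by
  by_cases hxy : x < y
  · rw [stb_unfold a n x y hxy]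
    rw [PySem.List.foldl_congr_mem _ _ (fun (res : Int) (_ : Int) => res) _ (by
      intro acc i hi
      rw [PySem.List.mem_pyRange_one] at hi
      rw [PySem.List.pyRange_one_eq_nil (by omega), List.foldl_nil])]
    exact List.foldl_fixed _
  · exact stbF_of_ge _ _ _ _ _ (by omega)

-- … and clamping the upper bound to n - 1 does not change A's value
theorem stb_of_ge (a : List Int) (n l h_ : Int) (h : l ≥ h_) : stb a n l h_ = 0 :=
  stbF_of_ge (h_ - l).toNat a n l h_ h

theorem stb_clamp (a : List Int) (n y : Int) (hy : n - 1 ≤ y) :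
    ∀ (k : Nat) (x : Int), (y - x).toNat ≤ k → stb a n x y = stb a n x (n - 1) := by
  intro k
  induction k with
  | zero =>
    intro x hk
    rw [stb_of_ge a n x y (by omega), stb_of_ge_pred a n x (n - 1) (by omega)]
  | succ k ih =>
    intro x hk
    by_cases hxy : x < y
    · by_cases hx : n - 1 ≤ x
      · rw [stb_of_ge_pred a n x y hx, stb_of_ge_pred a n x (n - 1) hx]
      · rw [stb_unfold a n x y hxy, stb_unfold a n x (n - 1) (by omega)]
        rw [PySem.List.pyRange_one_append x (n - 1) y (by omega) (by omega), List.foldl_append]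
        rw [PySem.List.foldl_congr_mem
              (PySem.List.pyRange (n - 1) y 1) _ (fun (res : Int) (_ : Int) => res) _ (by
            intro acc i hi
            rw [PySem.List.mem_pyRange_one] at hi
            rw [PySem.List.pyRange_one_eq_nil (by omega), List.foldl_nil])]
        rw [List.foldl_fixed]
        refine PySem.List.foldl_congr_mem _ _ _ _ ?_
        intro acc i hi
        rw [PySem.List.mem_pyRange_one] at hi
        refine PySem.List.foldl_congr_mem _ _ _ _ ?_
        intro acc2 j hj
        rw [PySem.List.mem_pyRange_one] at hj
        rw [ih (j + 1) (by omega)]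
    · rw [stb_of_ge a n x y (by omega), stb_of_ge a n x (n - 1) (by omega)]

-- ===== VERDICT (by name: the statement is the Claim_ definition above) =====
theorem stb_spec : Claim_equal_stb := by
  intro a n l h_ _hdom _hpre
  unfold Spec_stb stb_alt
  have hclamp : stb a n l h_ = stb a n l (min h_ (n - 1)) := by
    by_cases hmin : h_ ≤ n - 1
    · rw [min_eq_left hmin]
    · rw [min_eq_right (by omega)]
      exact stb_clamp a n h_ (by omega) (h_ - l).toNat l le_rfl
  by_cases hlh : l ≥ min h_ (n - 1)
  · rw [if_pos hlh, hclamp]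
    exact stbF_of_ge _ _ _ _ _ hlh
  · rw [if_neg hlh, hclamp]
    have hbase : pvInv a n l (min h_ (n - 1)) 1 PySem.Dict.empty := by
      intro x y hx hy hg
      unfold pvGet
      rw [if_pos (by omega)]
      exact (stbF_of_ge _ _ _ _ _ (by omega)).symm
    have hfill := pvFrom a n l (min h_ (n - 1)) (min h_ (n - 1) - l).toNat 1
      PySem.Dict.empty le_rfl hbase
    rw [show (1 : Int) + ((min h_ (n - 1) - l).toNat : Nat) = min h_ (n - 1) - l + 1 by omega]
      at hfill
    exact (hfill l (min h_ (n - 1)) le_rfl le_rfl (by omega)).symm
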